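-- pv_equiv track=rewrite | github.com/gakawarstone/gkbot | bot/services/gkfeed.py | _sort_items_by_feed
-- ===== SOURCE A (Python) =====
-- def _sort_items_by_feed(items: list[dict]) -> list[dict]:
--     items_by_id = sorted(items, key=lambda x: x["id"])
--
--     items_by_feed: dict[int, list[dict]] = {}
--     for item in items_by_id:
--         feed_id = item["feed_id"]
--         if feed_id not in items_by_feed:
--             items_by_feed[feed_id] = []
--         items_by_feed[feed_id].append(item)
--
--     final_sorted_items = []
--     processed_feed_ids = set()
--
--     for item in items_by_id:
--         feed_id = item["feed_id"]
--         if feed_id in processed_feed_ids: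
--             continue
--
--         final_sorted_items.extend(items_by_feed[feed_id])
--         processed_feed_ids.add(feed_id)
--
--     return final_sorted_items
-- ===== SOURCE B (Python) =====
-- def _sort_items_by_feed(items: list[dict]) -> list[dict]:
--     items_by_id = sorted(items, key=lambda x: x["id"])
--     feed_rank: dict[int, int] = {}
--     for item in items_by_id:
--         feed_rank.setdefault(item["feed_id"], len(feed_rank))
--     return sorted(items_by_id, key=lambda x: feed_rank[x["feed_id"]])
-- ===== Notes on version B (the rewrite author's own statement) =====
-- stated objective: simpler
-- what changed: Replaces A's dict-of-lists grouping plus second emission pass with a processed-set by a first-appearance feed-rank dict and one stable sort by that rank; stability keeps each feed's items contiguous and in id order.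
import Mathlib
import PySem

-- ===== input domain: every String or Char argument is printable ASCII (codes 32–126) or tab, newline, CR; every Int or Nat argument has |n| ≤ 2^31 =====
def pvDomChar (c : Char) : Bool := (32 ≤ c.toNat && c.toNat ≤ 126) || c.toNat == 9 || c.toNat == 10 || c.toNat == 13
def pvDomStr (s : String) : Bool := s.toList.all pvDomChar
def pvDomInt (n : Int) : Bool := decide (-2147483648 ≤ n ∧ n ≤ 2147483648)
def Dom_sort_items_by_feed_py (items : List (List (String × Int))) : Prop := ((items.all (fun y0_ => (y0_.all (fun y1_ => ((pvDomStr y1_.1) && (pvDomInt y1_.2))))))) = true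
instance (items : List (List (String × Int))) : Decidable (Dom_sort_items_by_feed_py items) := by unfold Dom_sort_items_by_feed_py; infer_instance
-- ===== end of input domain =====

-- B replaces A's dict-of-lists grouping and second emission pass (with a processed-set) by a
-- first-appearance feed-rank dict and one stable sort by that rank (objective: simpler).


-- ===== PORT A =====
-- shared helper: item["k"] for an item dict (first-match lookup), totalised with default 0;
-- Pre_ below excludes the inputs where the Python raises KeyError instead.
def pvKey (k : String) (item : List (String × Int)) : Int := (PySem.Dict.mk item).getD k 0

def sort_items_by_feed_py (items : List (List (String × Int))) : List (List (String × Int)) :=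
  let items_by_id := PySem.List.sorted items (fun x => pvKey "id" x)
  let items_by_feed : PySem.Dict Int (List (List (String × Int))) :=
    items_by_id.foldl (fun d item =>
      let feed_id := pvKey "feed_id" item
      let d := if d.contains feed_id then d else d.insert feed_id []
      d.insert feed_id (d.getD feed_id [] ++ [item])) PySem.Dict.empty
  let r := items_by_id.foldl (fun (acc : List (List (String × Int)) × PySem.Set Int) item =>
      let feed_id := pvKey "feed_id" item
      if PySem.Set.contains acc.2 feed_id then acc
      else (acc.1 ++ items_by_feed.getD feed_id [], PySem.Set.add acc.2 feed_id))
    ([], PySem.Set.empty)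
  r.1

-- ===== PORT B =====
def sort_items_by_feed_py_alt (items : List (List (String × Int))) : List (List (String × Int)) :=
  let items_by_id := PySem.List.sorted items (fun x => pvKey "id" x)
  let feed_rank : PySem.Dict Int Int :=
    items_by_id.foldl (fun d item => d.setdefault (pvKey "feed_id" item) (d.size : Int)) PySem.Dict.empty
  PySem.List.sorted items_by_id (fun x => feed_rank.getD (pvKey "feed_id" x) 0)

-- ===== PRECONDITION & SPEC =====
-- Pre_ excludes exactly the inputs containing an item without an "id" or "feed_id" key,
-- on which the Python A raises KeyError.
def Pre_sort_items_by_feed_py (items : List (List (String × Int))) : Prop :=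
  ∀ item ∈ items, (PySem.Dict.mk item).contains "id" = true ∧ (PySem.Dict.mk item).contains "feed_id" = true
instance (items : List (List (String × Int))) : Decidable (Pre_sort_items_by_feed_py items) := by unfold Pre_sort_items_by_feed_py; infer_instance

def pvWitness_sort_items_by_feed_py : (List (List (String × Int))) :=
  [[("id", 2), ("feed_id", 1)], [("id", 1), ("feed_id", 1)], [("id", 3), ("feed_id", 0)]]

def Spec_sort_items_by_feed_py (items : List (List (String × Int))) (out : List (List (String × Int))) : Prop := out = sort_items_by_feed_py_alt items
instance (items : List (List (String × Int))) (out : List (List (String × Int))) : Decidable (Spec_sort_items_by_feed_py items out) := by unfold Spec_sort_items_by_feed_py; infer_instance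

-- ===== CLAIM (what is proved, stated in full; the proofs are below) =====
def Claim_equal_sort_items_by_feed_py : Prop := ∀ (items : List (List (String × Int))), Dom_sort_items_by_feed_py items → Pre_sort_items_by_feed_py items → Spec_sort_items_by_feed_py items (sort_items_by_feed_py items)

-- ===== LEMMAS AND PROOFS =====

-- proof-only abbreviations: the feeds in first-appearance order of a list, and a feed's group
def pvFeeds (s : List (List (String × Int))) : List Int := PySem.Set.ofList (s.map (pvKey "feed_id"))
def pvGroup (s : List (List (String × Int))) (f : Int) : List (List (String × Int)) :=
  s.filter (fun x => pvKey "feed_id" x == f)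

-- the first-appearance feeds of fs that are not yet in seen
def pvNewFeeds (fs : List Int) (seen : PySem.Set Int) : List Int :=
  match fs with
  | [] => []
  | f :: t => if PySem.Set.contains seen f then pvNewFeeds t seen else f :: pvNewFeeds t (PySem.Set.add seen f)

theorem getD_not_contains {κ ν : Type} [BEq κ] [LawfulBEq κ] (d : PySem.Dict κ ν) (k : κ) (dflt : ν)
    (h : d.contains k = false) : d.getD k dflt = dflt := by
  have := (PySem.Dict.get?_eq_none_iff_contains d k).2 h
  simp [PySem.Dict.getD, this]

theorem lemA_newFeeds (fs : List Int) (seen : PySem.Set Int) :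
    PySem.Set.update seen fs = seen ++ pvNewFeeds fs seen := by
  induction fs generalizing seen with
  | nil => simp [PySem.Set.update, pvNewFeeds]
  | cons f t ih =>
    show PySem.Set.update (PySem.Set.add seen f) t = _
    by_cases h : f ∈ seen
    · rw [pvNewFeeds]
      simp [PySem.Set.add, PySem.Set.contains, h, ih]
    · rw [pvNewFeeds, ih]
      simp [PySem.Set.add, PySem.Set.contains, h]

-- A's emission loop appends the groups of the not-yet-seen feeds in first-appearance order
theorem lemA_emit (G : Int → List (List (String × Int))) (l : List (List (String × Int)))
    (acc : List (List (String × Int))) (seen : PySem.Set Int) :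
    (l.foldl (fun (acc : List (List (String × Int)) × PySem.Set Int) item =>
      let feed_id := pvKey "feed_id" item
      if PySem.Set.contains acc.2 feed_id then acc
      else (acc.1 ++ G feed_id, PySem.Set.add acc.2 feed_id)) (acc, seen)).1
    = acc ++ (pvNewFeeds (l.map (pvKey "feed_id")) seen).flatMap G := by
  induction l generalizing acc seen with
  | nil => simp [pvNewFeeds]
  | cons x t ih =>
    simp only [List.foldl_cons, List.map_cons]
    by_cases h : pvKey "feed_id" x ∈ seen
    · have hc : PySem.Set.contains seen (pvKey "feed_id" x) = true := by
        simp [PySem.Set.contains, h]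
      rw [pvNewFeeds]
      simp only [hc, if_true]
      exact ih acc seen
    · have hc : PySem.Set.contains seen (pvKey "feed_id" x) = false := by
        simp [PySem.Set.contains, h]
      rw [pvNewFeeds]
      simp only [hc, Bool.false_eq_true, if_false]
      rw [ih]
      simp

-- A's grouping dict maps f to the f-group of the processed prefix
theorem lemA_getD (l : List (List (String × Int))) (d : PySem.Dict Int (List (List (String × Int)))) (f : Int) :
    (l.foldl (fun d item =>
      let feed_id := pvKey "feed_id" item
      let d := if d.contains feed_id then d else d.insert feed_id []
      d.insert feed_id (d.getD feed_id [] ++ [item])) d).getD f []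
    = d.getD f [] ++ pvGroup l f := by
  induction l generalizing d with
  | nil => simp [pvGroup]
  | cons x t ih =>
    simp only [List.foldl_cons]
    rw [ih]
    have hstep : ∀ (d : PySem.Dict Int (List (List (String × Int)))),
        ((let d' := if d.contains (pvKey "feed_id" x) then d else d.insert (pvKey "feed_id" x) [];
          d'.insert (pvKey "feed_id" x) (d'.getD (pvKey "feed_id" x) [] ++ [x])).getD f [])
        = d.getD f [] ++ if pvKey "feed_id" x == f then [x] else [] := by
      intro d
      by_cases hc : d.contains (pvKey "feed_id" x) = true
      · simp only [hc, if_true]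
        rw [PySem.Dict.getD_insert]
        by_cases hf : f = pvKey "feed_id" x
        · simp [hf]
        · simp [hf, Ne.symm hf, beq_iff_eq]
      · simp only [Bool.not_eq_true] at hc
        simp only [hc, Bool.false_eq_true, if_false]
        rw [PySem.Dict.getD_insert, PySem.Dict.getD_insert]
        by_cases hf : f = pvKey "feed_id" x
        · simp [hf, getD_not_contains _ _ _ hc]
        · simp [PySem.Dict.getD_insert, hf, Ne.symm hf, beq_iff_eq]
    rw [hstep]
    by_cases hf : (pvKey "feed_id" x == f) = true
    · simp [pvGroup, hf]
    · simp [pvGroup, hf]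

-- B's rank dict maps each feed to its first-appearance index among the keys
theorem lemB_rank (l : List (List (String × Int))) (d : PySem.Dict Int Int)
    (hd : ∀ f ∈ d.keys, d.get? f = some (d.keys.idxOf f : Int)) :
    (l.foldl (fun d item => d.setdefault (pvKey "feed_id" item) (d.size : Int)) d).keys
      = PySem.Set.update d.keys (l.map (pvKey "feed_id"))
    ∧ ∀ f ∈ (l.foldl (fun d item => d.setdefault (pvKey "feed_id" item) (d.size : Int)) d).keys,
        (l.foldl (fun d item => d.setdefault (pvKey "feed_id" item) (d.size : Int)) d).get? f
          = some (((l.foldl (fun d item => d.setdefault (pvKey "feed_id" item) (d.size : Int)) d).keys.idxOf f : Int)) := by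
  induction l generalizing d with
  | nil => exact ⟨rfl, fun f hf => hd f hf⟩
  | cons x t ih =>
    simp only [List.foldl_cons, List.map_cons]
    by_cases hc : d.contains (pvKey "feed_id" x) = true
    · rw [PySem.Dict.setdefault_of_contains d _ hc]
      have hmem : pvKey "feed_id" x ∈ d.keys := (PySem.Dict.contains_iff_mem_keys d _).1 hc
      have hadd : PySem.Set.add d.keys (pvKey "feed_id" x) = d.keys := by
        simp [PySem.Set.add, PySem.Set.contains, hmem]
      rw [show PySem.Set.update d.keys (pvKey "feed_id" x :: List.map (pvKey "feed_id") t)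
            = PySem.Set.update (PySem.Set.add d.keys (pvKey "feed_id" x)) (List.map (pvKey "feed_id") t) from rfl,
          hadd]
      exact ih d hd
    · simp only [Bool.not_eq_true] at hc
      rw [PySem.Dict.setdefault_of_not_contains d _ hc]
      have hnmem : pvKey "feed_id" x ∉ d.keys := by
        intro hm
        rw [(PySem.Dict.contains_iff_mem_keys d _).2 hm] at hc
        simp at hc
      have hkeys : (d.insert (pvKey "feed_id" x) (d.size : Int)).keys = d.keys ++ [pvKey "feed_id" x] :=
        PySem.Dict.keys_insert_of_not_contains d _ hc
      have hsize : d.keys.length = d.size := by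
        simp [PySem.Dict.keys, PySem.Dict.size]
      have hd' : ∀ f ∈ (d.insert (pvKey "feed_id" x) (d.size : Int)).keys,
          (d.insert (pvKey "feed_id" x) (d.size : Int)).get? f
            = some (((d.insert (pvKey "feed_id" x) (d.size : Int)).keys.idxOf f : Int)) := by
        intro f hf
        rw [hkeys] at hf ⊢
        rw [PySem.Dict.get?_insert]
        by_cases hfx : f = pvKey "feed_id" x
        · subst hfx
          rw [if_pos rfl, List.idxOf_append, if_neg hnmem]
          simp [List.idxOf_cons_self, hsize]
        · rw [if_neg hfx]
          have hfk : f ∈ d.keys := by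
            rcases List.mem_append.1 hf with h | h
            · exact h
            · simp at h; exact absurd h hfx
          rw [List.idxOf_append, if_pos hfk]
          exact hd f hfk
      have := ih (d.insert (pvKey "feed_id" x) (d.size : Int)) hd'
      refine ⟨?_, this.2⟩
      rw [this.1, hkeys]
      rw [show PySem.Set.update d.keys (pvKey "feed_id" x :: List.map (pvKey "feed_id") t)
            = PySem.Set.update (PySem.Set.add d.keys (pvKey "feed_id" x)) (List.map (pvKey "feed_id") t) from rfl]
      have : PySem.Set.add d.keys (pvKey "feed_id" x) = d.keys ++ [pvKey "feed_id" x] := by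
        simp [PySem.Set.add, PySem.Set.contains, hnmem]
      rw [this]

-- insertBy walks past a block of elements it does not go before
theorem insertBy_append_not_before {α : Type} (before : α → α → Bool) (x : α) (ys zs : List α)
    (h : ∀ y ∈ ys, before x y = false) :
    PySem.List.insertBy before x (ys ++ zs) = ys ++ PySem.List.insertBy before x zs := by
  induction ys with
  | nil => simp
  | cons y t ih =>
    have hy := h y (by simp)
    show PySem.List.insertBy before x (y :: (t ++ zs)) = _
    simp only [PySem.List.insertBy, hy, Bool.false_eq_true, if_false, List.cons_append]
    exact congrArg (y :: ·) (ih (fun a ha => h a (by simp [ha])))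

theorem insertBy_all_before {α : Type} (before : α → α → Bool) (x : α) (ys : List α)
    (h : ∀ y ∈ ys, before x y = true) :
    PySem.List.insertBy before x ys = x :: ys := by
  cases ys with
  | nil => simp [PySem.List.insertBy]
  | cons y t => simp [PySem.List.insertBy, h y (by simp)]

-- inserting an element whose key is larger than every block's rank appends it at the end
theorem insertBy_flatMap_new {α : Type} (key : α → Int) (x : α) (rank : Int → Int)
    (rs : List Int) (B : Int → List α)
    (hblk : ∀ f ∈ rs, ∀ y ∈ B f, key y = rank f)
    (hlt : ∀ f ∈ rs, rank f < key x) :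
    PySem.List.insertBy (fun a b => decide (key a < key b)) x (rs.flatMap B)
      = rs.flatMap B ++ [x] := by
  apply PySem.List.insertBy_of_forall_not_before
  intro y hy
  rcases List.mem_flatMap.1 hy with ⟨f, hf, hyf⟩
  have := hblk f hf y hyf
  have := hlt f hf
  simp only [decide_eq_false_iff_not, not_lt]
  omega

-- inserting an element whose key matches block f₀ lands at the end of that block
theorem insertBy_flatMap_mem {α : Type} (key : α → Int) (x : α) (rank : Int → Int)
    (rs : List Int) (B : Int → List α) (f₀ : Int)
    (hmono : rs.Pairwise (fun a b => rank a < rank b))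
    (hblk : ∀ f ∈ rs, ∀ y ∈ B f, key y = rank f)
    (hmem : f₀ ∈ rs) (hx : key x = rank f₀) :
    PySem.List.insertBy (fun a b => decide (key a < key b)) x (rs.flatMap B)
      = rs.flatMap (fun f => if f = f₀ then B f ++ [x] else B f) := by
  induction rs with
  | nil => cases hmem
  | cons f rs' ih =>
    have hlt' : ∀ g ∈ rs', rank f < rank g := fun g hg => (List.pairwise_cons.1 hmono).1 g hg
    have hmono' := (List.pairwise_cons.1 hmono).2
    have hblk' : ∀ g ∈ rs', ∀ y ∈ B g, key y = rank g := fun g hg => hblk g (by simp [hg])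
    simp only [List.flatMap_cons]
    by_cases hf : f = f₀
    · subst hf
      rw [insertBy_append_not_before _ _ _ _ (fun y hy => by
        have := hblk f (by simp) y hy
        simp only [decide_eq_false_iff_not, not_lt]; omega)]
      rw [insertBy_all_before _ _ _ (fun y hy => by
        rcases List.mem_flatMap.1 hy with ⟨g, hg, hyg⟩
        have := hblk' g hg y hyg
        have := hlt' g hg
        simp only [decide_eq_true_eq]; omega)]
      rw [if_pos rfl]
      have : rs'.flatMap (fun g => if g = f then B g ++ [x] else B g) = rs'.flatMap B := by
        apply List.flatMap_congr
        intro g hg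
        have := hlt' g hg
        rw [if_neg (by intro h; subst h; omega)]
      rw [this]
      simp
    · have hmem' : f₀ ∈ rs' := by rcases List.mem_cons.1 hmem with h | h; exact absurd h.symm hf; exact h
      rw [insertBy_append_not_before _ _ _ _ (fun y hy => by
        have h1 := hblk f (by simp) y hy
        have h2 := hlt' f₀ hmem'
        simp only [decide_eq_false_iff_not, not_lt]; omega)]
      rw [ih hmono' hblk' hmem']
      rw [if_neg hf]

-- Set.update only appends, so a set is a prefix of its update
theorem prefix_update {α : Type} [BEq α] (t : PySem.Set α) (l : List α) :
    t <+: PySem.Set.update t l := by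
  induction l generalizing t with
  | nil => exact List.prefix_rfl
  | cons a l ih =>
    refine List.IsPrefix.trans ?_ (ih (PySem.Set.add t a))
    rw [PySem.Set.add]
    split
    · exact List.prefix_rfl
    · exact t.prefix_append [a]

theorem ofList_append {α : Type} [BEq α] (a b : List α) :
    PySem.Set.ofList (a ++ b) = PySem.Set.update (PySem.Set.ofList a) b := by
  rw [PySem.Set.ofList_eq_foldl, PySem.Set.ofList_eq_foldl, List.foldl_append]
  rfl

-- main B-side invariant: the stable sort by first-appearance rank yields the grouped normal form
theorem lemB_main (s : List (List (String × Int))) (key : List (String × Int) → Int)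
    (hk : ∀ y ∈ s, key y = ((pvFeeds s).idxOf (pvKey "feed_id" y) : Int)) :
    PySem.List.sorted s key = (pvFeeds s).flatMap (pvGroup s) := by
  rw [PySem.List.sorted_eq_foldl_insertBy]
  set rank : Int → Int := fun f => ((pvFeeds s).idxOf f : Int) with hrank
  have main : ∀ (rest p : List (List (String × Int))), s = p ++ rest →
      List.foldl (fun acc x => PySem.List.insertBy (fun a b => decide (key a < key b)) x acc)
        ((PySem.Set.ofList (p.map (pvKey "feed_id"))).flatMap
          (fun f => p.filter (fun x => pvKey "feed_id" x == f))) rest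
      = (pvFeeds s).flatMap (pvGroup s) := by
    intro rest
    induction rest with
    | nil =>
      intro p hp
      rw [List.append_nil] at hp
      subst hp
      rfl
    | cons x rest ih =>
      intro p hp
      set rs := PySem.Set.ofList (p.map (pvKey "feed_id")) with hrs
      set Bp : Int → List (List (String × Int)) := fun f => p.filter (fun y => pvKey "feed_id" y == f) with hBp
      have hxs : x ∈ s := by rw [hp]; simp
      have hpfx : rs <+: pvFeeds s := by
        rw [hp, pvFeeds, List.map_append, ofList_append]
        exact prefix_update _ _
      rcases hpfx with ⟨u, hu⟩
      have hrsnd : rs.Nodup := PySem.Set.nodup_ofList _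
      have hidx : ∀ f ∈ rs, (pvFeeds s).idxOf f = rs.idxOf f := by
        intro f hf
        rw [← hu, List.idxOf_append, if_pos hf]
      have hmono : rs.Pairwise (fun a b => rank a < rank b) := by
        rw [List.pairwise_iff_getElem]
        intro i j hi hj hij
        have ha : rs[i] ∈ rs := List.getElem_mem hi
        have hb : rs[j] ∈ rs := List.getElem_mem hj
        simp only [hrank]
        rw [hidx _ ha, hidx _ hb, hrsnd.idxOf_getElem i hi, hrsnd.idxOf_getElem j hj]
        exact_mod_cast hij
      have hblk : ∀ f ∈ rs, ∀ y ∈ Bp f, key y = rank f := by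
        intro f hf y hy
        have hyp : y ∈ p := List.mem_of_mem_filter hy
        have hkey : pvKey "feed_id" y = f := by
          have := List.of_mem_filter hy
          exact beq_iff_eq.1 this
        have hys : y ∈ s := by rw [hp]; exact List.mem_append_left _ hyp
        rw [hk y hys, hkey]
      have hstep : PySem.List.insertBy (fun a b => decide (key a < key b)) x (rs.flatMap Bp)
          = (PySem.Set.ofList ((p ++ [x]).map (pvKey "feed_id"))).flatMap
              (fun f => (p ++ [x]).filter (fun y => pvKey "feed_id" y == f)) := by
        set f₀ := pvKey "feed_id" x with hf₀
        have hxkey : key x = rank f₀ := hk x hxs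
        have hofl : PySem.Set.ofList ((p ++ [x]).map (pvKey "feed_id")) = PySem.Set.add rs f₀ := by
          rw [List.map_append, ofList_append]
          rfl
        by_cases hmem : f₀ ∈ rs
        · rw [insertBy_flatMap_mem key x rank rs Bp f₀ hmono hblk hmem hxkey]
          rw [hofl]
          have : PySem.Set.add rs f₀ = rs := by simp [PySem.Set.add, PySem.Set.contains, hmem]
          rw [this]
          apply List.flatMap_congr
          intro f hf
          rw [List.filter_append]
          by_cases hff : f = f₀
          · subst hff
            simp only [hBp]
            have hxf : (pvKey "feed_id" x == f₀) = true := by simp [hf₀]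
            simp [hxf]
          · rw [if_neg hff]
            have : (pvKey "feed_id" x == f) = false := by
              simp only [hf₀] at *
              simp [beq_eq_false_iff_ne]
              intro h; exact hff h.symm
            simp [this, hBp]
        · have hlt : ∀ f ∈ rs, rank f < key x := by
            intro f hf
            rw [hxkey]
            simp only [hrank]
            rw [hidx f hf]
            have h1 : rs.idxOf f < rs.length := List.idxOf_lt_length_of_mem hf
            have h2 : (pvFeeds s).idxOf f₀ ≥ rs.length := by
              rw [← hu, List.idxOf_append, if_neg hmem]
              omega
            exact_mod_cast lt_of_lt_of_le h1 h2
          rw [insertBy_flatMap_new key x rank rs Bp hblk hlt]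
          rw [hofl]
          have : PySem.Set.add rs f₀ = rs ++ [f₀] := by simp [PySem.Set.add, PySem.Set.contains, hmem]
          rw [this, List.flatMap_append]
          congr 1
          · apply List.flatMap_congr
            intro f hf
            rw [List.filter_append]
            have : (pvKey "feed_id" x == f) = false := by
              simp only [beq_eq_false_iff_ne]
              intro h; rw [← h] at hf; exact hmem hf
            simp [this, hBp]
          · have hfe : p.filter (fun y => pvKey "feed_id" y == f₀) = [] := by
              rw [List.filter_eq_nil_iff]
              intro y hy hb
              apply hmem
              rw [hrs, PySem.Set.mem_ofList]
              exact List.mem_map.2 ⟨y, hy, beq_iff_eq.1 hb⟩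
            have hxf : (pvKey "feed_id" x == f₀) = true := by simp [hf₀]
            simp [List.flatMap_cons, List.filter_append, hfe, List.filter_cons]
            exact hf₀.symm
      rw [List.foldl_cons, hstep, ih (p ++ [x]) (by rw [hp]; simp)]
  have h0 := main s [] rfl
  simpa [pvGroup] using h0

-- A and B agree on every input
theorem ports_agree (items : List (List (String × Int))) :
    sort_items_by_feed_py items = sort_items_by_feed_py_alt items := by
  set s := PySem.List.sorted items (fun x => pvKey "id" x) with hs
  obtain ⟨hkeys, hget⟩ := lemB_rank s PySem.Dict.empty (by simp)
  set rank := s.foldl (fun d item => d.setdefault (pvKey "feed_id" item) (d.size : Int)) PySem.Dict.empty with hr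
  have hkeys' : rank.keys = pvFeeds s := by
    rw [hkeys, pvFeeds, PySem.Set.ofList_eq_foldl]
    rfl
  have hk : ∀ y ∈ s, rank.getD (pvKey "feed_id" y) 0 = ((pvFeeds s).idxOf (pvKey "feed_id" y) : Int) := by
    intro y hy
    have hmem : pvKey "feed_id" y ∈ rank.keys := by
      rw [hkeys', pvFeeds, PySem.Set.mem_ofList]
      exact List.mem_map.2 ⟨y, hy, rfl⟩
    have := hget _ hmem
    rw [PySem.Dict.getD, this, hkeys']
    rfl
  have hB : sort_items_by_feed_py_alt items = (pvFeeds s).flatMap (pvGroup s) := by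
    show PySem.List.sorted s (fun x => rank.getD (pvKey "feed_id" x) 0) = _
    exact lemB_main s _ hk
  have hA : sort_items_by_feed_py items = (pvFeeds s).flatMap (pvGroup s) := by
    show (s.foldl (fun (acc : List (List (String × Int)) × PySem.Set Int) item =>
      let feed_id := pvKey "feed_id" item
      if PySem.Set.contains acc.2 feed_id then acc
      else (acc.1 ++ (s.foldl (fun d item =>
          let feed_id := pvKey "feed_id" item
          let d := if d.contains feed_id then d else d.insert feed_id []
          d.insert feed_id (d.getD feed_id [] ++ [item])) PySem.Dict.empty).getD feed_id [],
        PySem.Set.add acc.2 feed_id))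
      ([], PySem.Set.empty)).1 = _
    rw [lemA_emit (fun f => (s.foldl (fun d item =>
          let feed_id := pvKey "feed_id" item
          let d := if d.contains feed_id then d else d.insert feed_id []
          d.insert feed_id (d.getD feed_id [] ++ [item])) PySem.Dict.empty).getD f []) s [] PySem.Set.empty]
    have h1 : pvNewFeeds (s.map (pvKey "feed_id")) PySem.Set.empty = pvFeeds s := by
      have h3 := lemA_newFeeds (s.map (pvKey "feed_id")) PySem.Set.empty
      rw [pvFeeds, PySem.Set.ofList_eq_foldl]
      have h2 : PySem.Set.update PySem.Set.empty (s.map (pvKey "feed_id"))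
          = (s.map (pvKey "feed_id")).foldl PySem.Set.add [] := rfl
      rw [← h2, h3]
      rfl
    rw [h1, List.nil_append]
    apply List.flatMap_congr
    intro f hf
    rw [lemA_getD]
    simp
  rw [hA, hB]

-- ===== VERDICT (by name: the statement is the Claim_ definition above) =====
theorem sort_items_by_feed_py_spec : Claim_equal_sort_items_by_feed_py := by
  intro items _ _
  show sort_items_by_feed_py items = sort_items_by_feed_py_alt items
  exact ports_agree items
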